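-- pv_equiv track=rewrite | github.com/wxxedu/md2anki | Conversions/gen_obsidian_url.py | capitalize_unicode
-- ===== SOURCE A (Python) =====
-- def capitalize_unicode(string):
-- 	new = []
-- 	position = -5
-- 	for index in range(0, len(string)):
-- 		if string[index] == "%":
-- 			position = index
-- 			new.append(string[index])
-- 		elif index == position + 1 or index == position + 2:
-- 			new.append(string[index].capitalize())
-- 		else:
-- 			new.append(string[index])
-- 	return "".join(new)
-- ===== SOURCE B (Python) =====
-- def capitalize_unicode(string):
-- 	out = []
-- 	i, n = 0, len(string)
-- 	while i < n:
-- 		ch = string[i]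
-- 		out.append(ch)
-- 		i += 1
-- 		if ch == "%":
-- 			budget = 2
-- 			while i < n and budget > 0 and string[i] != "%":
-- 				out.append(string[i].capitalize())
-- 				i += 1
-- 				budget -= 1
-- 	return "".join(out)
-- ===== Notes on version B (the rewrite author's own statement) =====
-- stated objective: alternative
-- what changed: Replaces the index/position-marker scan (position = last '%' index, compared via index == position+1/+2) with a nested-loop segment consumer that, after emitting each '%', directly consumes and capitalizes a window of up to two following non-'%' characters; no index arithmetic or position state remains.
import Mathlib
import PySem

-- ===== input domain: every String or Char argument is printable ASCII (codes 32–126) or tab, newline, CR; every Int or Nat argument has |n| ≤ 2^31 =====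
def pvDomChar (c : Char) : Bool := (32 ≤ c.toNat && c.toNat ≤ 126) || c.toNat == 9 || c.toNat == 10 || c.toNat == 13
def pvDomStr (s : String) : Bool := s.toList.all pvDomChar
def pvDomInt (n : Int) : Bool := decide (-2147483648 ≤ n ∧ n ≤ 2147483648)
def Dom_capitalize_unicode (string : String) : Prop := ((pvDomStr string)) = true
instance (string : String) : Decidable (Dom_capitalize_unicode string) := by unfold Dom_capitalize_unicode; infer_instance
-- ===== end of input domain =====

-- B replaces A's last-'%'-index bookkeeping by a nested loop that capitalizes a window of
-- up to two non-'%' characters right after each '%' (alternative decomposition, same cost).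
-- Per-character .capitalize() is ported as PySem.Chars.upperChar, exact on the ASCII domain.

-- ===== PORT A =====
-- loop body of A (branches in A's order; state = (position, new))
def capuStep (st : Int × List Char) (p : Int × Char) : Int × List Char :=
  let position := st.1
  let new := st.2
  let index := p.1
  let c := p.2
  if c = '%' then (index, new ++ [c])
  else if index = position + 1 ∨ index = position + 2 then
    (position, new ++ [PySem.Chars.upperChar c])
  else (position, new ++ [c])

def capitalize_unicode (string : String) : String :=
  String.mk ((PySem.List.enumerate string.toList).foldl capuStep ((-5 : Int), ([] : List Char))).2

-- ===== PORT B =====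
-- inner while loop of Source B: consume and capitalize up to `budget` non-'%' chars
def capuWindow : Nat → List Char → (List Char × List Char)
  | 0, cs => ([], cs)
  | _ + 1, [] => ([], [])
  | b + 1, c :: cs =>
    if c = '%' then ([], c :: cs)
    else
      let r := capuWindow b cs
      (PySem.Chars.upperChar c :: r.1, r.2)

theorem capuWindow_snd_length_le (b : Nat) (cs : List Char) :
    (capuWindow b cs).2.length ≤ cs.length := by
  induction cs generalizing b with
  | nil => cases b <;> simp [capuWindow]
  | cons c cs ih =>
    cases b with
    | zero => simp [capuWindow]
    | succ b =>
      by_cases h : c = '%' <;> simp [capuWindow, h]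
      exact Nat.le_succ_of_le (ih b)

-- outer while loop of Source B
def capuGo : List Char → List Char
  | [] => []
  | c :: cs =>
    if c = '%' then
      let r := capuWindow 2 cs
      c :: (r.1 ++ capuGo r.2)
    else c :: capuGo cs
termination_by cs => cs.length
decreasing_by
  · exact Nat.lt_succ_of_le (capuWindow_snd_length_le 2 cs)
  · simp

def capitalize_unicode_alt (string : String) : String :=
  String.mk (capuGo string.toList)

-- ===== PRECONDITION & SPEC =====
def Spec_capitalize_unicode (string : String) (out : String) : Prop := out = capitalize_unicode_alt string
instance (string : String) (out : String) : Decidable (Spec_capitalize_unicode string out) := by unfold Spec_capitalize_unicode; infer_instance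

-- ===== CLAIM (what is proved, stated in full; the proofs are below) =====
def Claim_equal_capitalize_unicode : Prop := ∀ (string : String), Dom_capitalize_unicode string → Spec_capitalize_unicode string (capitalize_unicode string)

-- ===== LEMMAS AND PROOFS =====

-- proof-only reference automaton: remaining capitalization budget
def goB : Nat → List Char → List Char
  | _, [] => []
  | k, c :: cs =>
    if c = '%' then c :: goB 2 cs
    else if 0 < k then PySem.Chars.upperChar c :: goB (k - 1) cs
    else c :: goB 0 cs

theorem capuGo_eq_goB (cs : List Char) (k : Nat) (hk : k ≤ 2) :
    goB k cs = (capuWindow k cs).1 ++ capuGo (capuWindow k cs).2 := by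
  induction cs generalizing k with
  | nil => cases k <;> simp [goB, capuWindow, capuGo]
  | cons c cs ih =>
    by_cases h : c = '%'
    · subst h
      cases k with
      | zero =>
        simp only [capuWindow, goB, capuGo]
        rw [ih 2 (by omega)]
        simp
      | succ b =>
        simp only [capuWindow, goB]
        rw [ih 2 (by omega)]
        simp [capuGo]
    · cases k with
      | zero =>
        simp only [capuWindow, goB, if_neg h, Nat.lt_irrefl, if_false]
        rw [capuGo, if_neg h, ih 0 (by omega)]
        simp [capuWindow]
      | succ b =>
        simp only [capuWindow, goB, if_neg h, Nat.succ_sub_one]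
        rw [if_pos (Nat.succ_pos b), ih b (by omega)]
        simp

-- A's fold with state (position, acc), characterized by the budget automaton
theorem foldA_eq_goB (cs : List Char) (i : Nat) (p : Int) (k : Nat) (acc : List Char)
    (hp : p < (i : Int)) (hk : (k : Int) = max 0 (min 2 (p + 3 - (i : Int)))) :
    ((PySem.List.enumerate cs i).foldl capuStep (p, acc)).2 = acc ++ goB k cs := by
  induction cs generalizing i p k acc with
  | nil => simp [PySem.List.enumerate_nil, goB]
  | cons c cs ih =>
    rw [PySem.List.enumerate_cons, List.foldl_cons]
    by_cases h : c = '%'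
    · subst h
      have hs : capuStep (p, acc) ((i : Int), '%') = ((i : Int), acc ++ ['%']) := by
        simp [capuStep]
      rw [hs]
      have := ih (i + 1) (i : Int) 2 (acc ++ ['%']) (by push_cast; omega) (by push_cast; omega)
      rw [Nat.cast_add, Nat.cast_one] at this
      rw [this]
      simp [goB]
    · by_cases hc : (i : Int) = p + 1 ∨ (i : Int) = p + 2
      · have hs : capuStep (p, acc) ((i : Int), c) = (p, acc ++ [PySem.Chars.upperChar c]) := by
          simp [capuStep, h, hc]
        rw [hs]
        have hkpos : 0 < k := by omega
        have := ih (i + 1) p (k - 1) (acc ++ [PySem.Chars.upperChar c]) (by push_cast; omega)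
          (by push_cast; omega)
        rw [Nat.cast_add, Nat.cast_one] at this
        rw [this]
        simp [goB, if_neg h, hkpos]
      · have hs : capuStep (p, acc) ((i : Int), c) = (p, acc ++ [c]) := by
          simp [capuStep, h, hc]
        rw [hs]
        have hk0 : k = 0 := by omega
        have := ih (i + 1) p 0 (acc ++ [c]) (by push_cast; omega) (by push_cast; omega)
        rw [Nat.cast_add, Nat.cast_one] at this
        rw [this]
        simp [goB, if_neg h, hk0]

-- ===== VERDICT (by name: the statement is the Claim_ definition above) =====
theorem capitalize_unicode_spec : Claim_equal_capitalize_unicode := by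
  intro s _
  show _ = _
  unfold capitalize_unicode capitalize_unicode_alt
  rw [show PySem.List.enumerate s.toList = PySem.List.enumerate s.toList (0 : Nat) from by norm_num,
      foldA_eq_goB s.toList 0 (-5) 0 [] (by omega) (by norm_num),
      capuGo_eq_goB s.toList 0 (by omega)]
  simp [capuWindow]
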